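-- pv_equiv track=rewrite | github.com/pypi-data/pypi-mirror-401 | packages/openagents/openagents-0.8.5.post5-py3-none-any.whl/openagents/config/llm_configs.py | determine_provider
-- ===== SOURCE A (Python) =====
-- from typing import Dict, List, Any, Optional
--
-- def determine_provider(
--     provider: Optional[str], model_name: str, api_base: Optional[str]
-- ) -> str:
--     """Determine the model provider based on configuration.
--
--     Args:
--         provider: Explicitly specified provider (takes precedence)
--         model_name: Name of the model to analyze
--         api_base: API base URL to analyze
--
--     Returns:
--         Determined provider name
--     """
--     if provider:
--         return provider.lower()
--
--     # Auto-detect provider based on API base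
--     if api_base:
--         if "azure.com" in api_base:
--             return "azure"
--         elif "deepseek.com" in api_base:
--             return "deepseek"
--         elif "aliyuncs.com" in api_base:
--             return "qwen"
--         elif "x.ai" in api_base:
--             return "grok"
--         elif "anthropic.com" in api_base:
--             return "claude"
--         elif "googleapis.com" in api_base:
--             return "gemini"
--         elif "groq.com" in api_base:
--             return "groq"
--
--     # Auto-detect based on model name
--     model_lower = model_name.lower()
--     if any(name in model_lower for name in ["gpt", "openai"]):
--         return "openai"
--     elif any(name in model_lower for name in ["claude"]):
--         return "claude"
--     elif any(name in model_lower for name in ["gemini"]):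
--         return "gemini"
--     elif any(name in model_lower for name in ["deepseek"]):
--         return "deepseek"
--     elif any(name in model_lower for name in ["qwen"]):
--         return "qwen"
--     elif any(name in model_lower for name in ["grok"]):
--         return "grok"
--     elif any(name in model_lower for name in ["mistral"]):
--         return "mistral"
--     elif any(name in model_lower for name in ["command"]):
--         return "cohere"
--     elif "sonar" in model_lower:
--         return "perplexity"
--     elif "anthropic." in model_name:
--         return "bedrock"
--     # Groq-specific model patterns (llama with specific suffixes, mixtral with context size)
--     elif any(name in model_lower for name in ["versatile", "instant", "32768", "gemma2"]):
--         return "groq"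
--     elif "llama" in model_lower or "meta-" in model_lower or "mixtral" in model_lower:
--         return "together"
--
--     # Default to OpenAI
--     return "openai"
-- ===== SOURCE B (Python) =====
-- _API_RULES = [
--     ("azure.com", "azure"),
--     ("deepseek.com", "deepseek"),
--     ("aliyuncs.com", "qwen"),
--     ("x.ai", "grok"),
--     ("anthropic.com", "claude"),
--     ("googleapis.com", "gemini"),
--     ("groq.com", "groq"),
-- ]
--
-- # flattened (pattern, match_lowercased?, provider) in precedence order;
-- # 'anthropic.' is case-sensitive against the original model name, as in the source
-- _MODEL_RULES = [
--     ("gpt", True, "openai"), ("openai", True, "openai"),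
--     ("claude", True, "claude"),
--     ("gemini", True, "gemini"),
--     ("deepseek", True, "deepseek"),
--     ("qwen", True, "qwen"),
--     ("grok", True, "grok"),
--     ("mistral", True, "mistral"),
--     ("command", True, "cohere"),
--     ("sonar", True, "perplexity"),
--     ("anthropic.", False, "bedrock"),
--     ("versatile", True, "groq"), ("instant", True, "groq"),
--     ("32768", True, "groq"), ("gemma2", True, "groq"),
--     ("llama", True, "together"), ("meta-", True, "together"),
--     ("mixtral", True, "together"),
-- ]
--
--
-- def determine_provider(provider, model_name, api_base):
--     if provider:
--         return provider.lower()
--     # Evaluate every rule up front (no short-circuiting), collect the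
--     # priorities of the ones that match, and return the best-priority hit.
--     model_lower = model_name.lower()
--     rules = []
--     if api_base:
--         rules += [(sub in api_base, prov) for sub, prov in _API_RULES]
--     rules += [(pat in (model_lower if low else model_name), prov)
--               for pat, low, prov in _MODEL_RULES]
--     hits = [(i, prov) for i, (matched, prov) in enumerate(rules) if matched]
--     return min(hits, key=lambda h: h[0], default=(0, "openai"))[1]
-- ===== Notes on version B (the rewrite author's own statement) =====
-- stated objective: alternative
-- what changed: Instead of A's short-circuiting if/elif chain, B evaluates every detection rule up front into a boolean vector, collects the priorities of all matching rules, and returns the provider with the minimal priority (min with a default), keeping the provider guard first.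
import Mathlib
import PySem

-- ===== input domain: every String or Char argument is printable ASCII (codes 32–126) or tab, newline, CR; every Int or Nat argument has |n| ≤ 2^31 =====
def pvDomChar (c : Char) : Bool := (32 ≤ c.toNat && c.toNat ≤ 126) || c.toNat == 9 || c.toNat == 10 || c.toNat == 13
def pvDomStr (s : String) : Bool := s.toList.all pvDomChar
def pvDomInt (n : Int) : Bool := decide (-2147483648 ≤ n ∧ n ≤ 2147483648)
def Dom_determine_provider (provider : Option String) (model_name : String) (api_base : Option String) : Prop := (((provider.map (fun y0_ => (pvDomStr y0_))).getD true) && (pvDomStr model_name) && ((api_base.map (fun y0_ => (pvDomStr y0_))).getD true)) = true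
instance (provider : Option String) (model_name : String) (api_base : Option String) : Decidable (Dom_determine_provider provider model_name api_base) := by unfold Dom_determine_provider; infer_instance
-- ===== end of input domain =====

-- B evaluates every detection rule up front, collects the priorities of all matches, and returns the minimal-priority provider (alternative decomposition; A short-circuits an if/elif chain).


-- ===== PORT A =====
def determine_provider (provider : Option String) (model_name : String) (api_base : Option String) : String :=
  if (match provider with | some p => !(p == "") | none => false) then
    PySem.Str.lower (provider.getD "")
  else
    (match api_base with
     | some ab =>
       if !(ab == "") then
         if PySem.Str.isIn "azure.com" ab then some "azure"
         else if PySem.Str.isIn "deepseek.com" ab then some "deepseek"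
         else if PySem.Str.isIn "aliyuncs.com" ab then some "qwen"
         else if PySem.Str.isIn "x.ai" ab then some "grok"
         else if PySem.Str.isIn "anthropic.com" ab then some "claude"
         else if PySem.Str.isIn "googleapis.com" ab then some "gemini"
         else if PySem.Str.isIn "groq.com" ab then some "groq"
         else none
       else none
     | none => none).getD
    (let model_lower := PySem.Str.lower model_name
     if ["gpt", "openai"].any (fun name => PySem.Str.isIn name model_lower) then "openai"
     else if ["claude"].any (fun name => PySem.Str.isIn name model_lower) then "claude"
     else if ["gemini"].any (fun name => PySem.Str.isIn name model_lower) then "gemini"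
     else if ["deepseek"].any (fun name => PySem.Str.isIn name model_lower) then "deepseek"
     else if ["qwen"].any (fun name => PySem.Str.isIn name model_lower) then "qwen"
     else if ["grok"].any (fun name => PySem.Str.isIn name model_lower) then "grok"
     else if ["mistral"].any (fun name => PySem.Str.isIn name model_lower) then "mistral"
     else if ["command"].any (fun name => PySem.Str.isIn name model_lower) then "cohere"
     else if PySem.Str.isIn "sonar" model_lower then "perplexity"
     else if PySem.Str.isIn "anthropic." model_name then "bedrock"
     else if ["versatile", "instant", "32768", "gemma2"].any (fun name => PySem.Str.isIn name model_lower) then "groq"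
     else if PySem.Str.isIn "llama" model_lower || (PySem.Str.isIn "meta-" model_lower || PySem.Str.isIn "mixtral" model_lower) then "together"
     else "openai")

-- ===== PORT B =====
-- Source B's rule tables
def pvApiRules : List (String × String) :=
  [("azure.com", "azure"), ("deepseek.com", "deepseek"), ("aliyuncs.com", "qwen"),
   ("x.ai", "grok"), ("anthropic.com", "claude"), ("googleapis.com", "gemini"), ("groq.com", "groq")]

def pvModelRules : List (String × Bool × String) :=
  [("gpt", true, "openai"), ("openai", true, "openai"), ("claude", true, "claude"),
   ("gemini", true, "gemini"), ("deepseek", true, "deepseek"), ("qwen", true, "qwen"),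
   ("grok", true, "grok"), ("mistral", true, "mistral"), ("command", true, "cohere"),
   ("sonar", true, "perplexity"), ("anthropic.", false, "bedrock"),
   ("versatile", true, "groq"), ("instant", true, "groq"), ("32768", true, "groq"),
   ("gemma2", true, "groq"), ("llama", true, "together"), ("meta-", true, "together"),
   ("mixtral", true, "together")]

def determine_provider_alt (provider : Option String) (model_name : String) (api_base : Option String) : String :=
  if (match provider with | some p => !(p == "") | none => false) then
    PySem.Str.lower (provider.getD "")
  else
    -- evaluate every rule up front into (matched?, provider) pairs
    let model_lower := PySem.Str.lower model_name
    let rules : List (Bool × String) :=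
      (if (match api_base with | some ab => !(ab == "") | none => false) then
         pvApiRules.map (fun r => (PySem.Str.isIn r.1 (api_base.getD ""), r.2))
       else []) ++
      pvModelRules.map (fun r => (PySem.Str.isIn r.1 (if r.2.1 then model_lower else model_name), r.2.2))
    -- hits = [(i, prov) for i, (matched, prov) in enumerate(rules) if matched]
    let hits : List (Int × String) :=
      ((PySem.List.enumerate rules).filter (fun x => x.2.1)).map (fun x => (x.1, x.2.2))
    -- min(hits, key=lambda h: h[0], default=(0, "openai"))[1]
    (PySem.List.minD hits (fun h => h.1) ((0 : Int), "openai")).2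

-- ===== PRECONDITION & SPEC =====
def Spec_determine_provider (provider : Option String) (model_name : String) (api_base : Option String) (out : String) : Prop := out = determine_provider_alt provider model_name api_base
instance (provider : Option String) (model_name : String) (api_base : Option String) (out : String) : Decidable (Spec_determine_provider provider model_name api_base out) := by unfold Spec_determine_provider; infer_instance

-- ===== CLAIM (what is proved, stated in full; the proofs are below) =====
def Claim_equal_determine_provider : Prop := ∀ (provider : Option String) (model_name : String) (api_base : Option String), Dom_determine_provider provider model_name api_base → Spec_determine_provider provider model_name api_base (determine_provider provider model_name api_base)

-- ===== LEMMAS AND PROOFS =====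

-- min with strictly increasing keys is the head
theorem pvMinD_pairwise {xs : List (Int × String)} (d : Int × String)
    (h : xs.Pairwise (fun a b => a.1 < b.1)) :
    PySem.List.minD xs (fun h => h.1) d = xs.headD d := by
  cases xs with
  | nil => rfl
  | cons x t =>
    have hne : PySem.List.min? (x :: t) (fun h => h.1) ≠ none := by
      intro hn
      exact (List.cons_ne_nil x t) ((PySem.List.min?_eq_none_iff _ _).mp hn)
    rcases Option.ne_none_iff_exists'.mp hne with ⟨m, hm⟩
    have hmem := PySem.List.min?_mem hm
    have hmin := PySem.List.min?_isMin hm x (List.mem_cons_self ..)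
    have : m = x := by
      rcases List.mem_cons.mp hmem with h1 | h2
      · exact h1
      · exact absurd hmin (not_le.mpr ((List.pairwise_cons.mp h).1 m h2))
    simp [PySem.List.minD, hm, this]

-- the hit list has strictly increasing priorities
theorem pvHits_pairwise (rules : List (Bool × String)) :
    ((((PySem.List.enumerate rules).filter (fun x => x.2.1)).map
        (fun x => (x.1, x.2.2))) : List (Int × String)).Pairwise (fun a b => a.1 < b.1) := by
  have h1 := PySem.List.pairwise_lt_enumerate rules 0
  exact (List.Pairwise.filter (fun x => x.2.1) h1).map _ (fun a b h => h)

-- the first-match reading of a (matched?, provider) rule list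
def pvFirstHit : List (Bool × String) → String
  | [] => "openai"
  | (b, p) :: rs => if b then p else pvFirstHit rs

-- head-of-hits = first match, for any enumeration start
theorem pvHead_hits (rules : List (Bool × String)) : ∀ (s : Int),
    (((((PySem.List.enumerate rules s).filter (fun x => x.2.1)).map
        (fun x => (x.1, x.2.2))) : List (Int × String)).headD ((0 : Int), "openai")).2
      = pvFirstHit rules := by
  induction rules with
  | nil => intro s; rfl
  | cons r rs ih =>
    intro s
    obtain ⟨b, p⟩ := r
    cases b with
    | false => simpa [PySem.List.enumerate_cons, pvFirstHit] using ih (s + 1)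
    | true => simp [PySem.List.enumerate_cons, pvFirstHit]

-- B's min-of-hits over a rule list is its first-match reading
theorem pvMin_eq_first (rules : List (Bool × String)) :
    (PySem.List.minD (((PySem.List.enumerate rules).filter (fun x => x.2.1)).map
        (fun x => (x.1, x.2.2))) (fun h => h.1) ((0 : Int), "openai")).2 = pvFirstHit rules := by
  rw [pvMinD_pairwise _ (pvHits_pairwise rules)]
  exact pvHead_hits rules 0

-- two successive rules with the same provider behave as one 'or' rule
theorem pv_ite_or (a b : Bool) (p q : String) :
    (if a then p else if b then p else q) = (if (a || b) then p else q) := by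
  cases a <;> cases b <;> rfl

-- getD distributes over an if-chain of options
theorem pv_getD_ite (c : Prop) [Decidable c] (p : String) (o : Option String) (m : String) :
    (if c then some p else o).getD m = if c then p else o.getD m := by
  split <;> rfl

-- ===== VERDICT (by name: the statement is the Claim_ definition above) =====
theorem determine_provider_spec : Claim_equal_determine_provider := by
  intro provider model_name api_base _
  unfold Spec_determine_provider determine_provider determine_provider_alt
  simp only [pvMin_eq_first]
  refine if_congr Iff.rfl rfl ?_
  cases api_base with
  | none =>
      simp only [pvApiRules, pvModelRules, List.map, List.cons_append, List.nil_append,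
        pvFirstHit, List.any_cons, List.any_nil, Bool.or_false, pv_ite_or, pv_getD_ite,
        Option.getD_none, Option.getD_some, Bool.or_assoc, reduceIte, Bool.false_eq_true, if_true, if_false]
  | some ab =>
      by_cases hg : (!(ab == "")) = true <;>
        simp only [hg, pvApiRules, pvModelRules, List.map, List.cons_append, List.nil_append,
          pvFirstHit, List.any_cons, List.any_nil, Bool.or_false, pv_ite_or, pv_getD_ite,
          Option.getD_none, Option.getD_some, Bool.or_assoc, reduceIte, if_true, if_false,
          Bool.false_eq_true]
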